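-- pv_equiv track=rewrite | github.com/Ramyakvr/PersonalFinanceTracker | app/core/management/commands/inspect_broker.py | _guess_header_row
-- ===== SOURCE A (Python) =====
-- def _guess_header_row(rows: list[list]) -> int:
--     """Header = the first row with >= 3 consecutive non-null text cells."""
--     for i, row in enumerate(rows):
--         text_run = 0
--         for cell in row or ():
--             if cell is not None and isinstance(cell, str) and cell.strip():
--                 text_run += 1
--                 if text_run >= 3:
--                     return i
--             else:
--                 text_run = 0
--     return -1
-- ===== SOURCE B (Python) =====
-- def _guess_header_row(rows: list[list]) -> int:
--     """Header = the first row with >= 3 consecutive non-null text cells."""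
--     def _has_run(row):
--         mask = [isinstance(c, str) and bool(c.strip()) for c in (row or ())]
--         return any(mask[j] and mask[j + 1] and mask[j + 2] for j in range(len(mask) - 2))
--     return next((i for i, row in enumerate(rows) if _has_run(row)), -1)
-- ===== Notes on version B (the rewrite author's own statement) =====
-- stated objective: alternative
-- what changed: Replaces A's running reset-counter with an early return by a staged decomposition: per row build a boolean validity mask, detect a run of three via an any() over sliding-window indices, and pick the first matching row index with next()/findIdx?.
import Mathlib
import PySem

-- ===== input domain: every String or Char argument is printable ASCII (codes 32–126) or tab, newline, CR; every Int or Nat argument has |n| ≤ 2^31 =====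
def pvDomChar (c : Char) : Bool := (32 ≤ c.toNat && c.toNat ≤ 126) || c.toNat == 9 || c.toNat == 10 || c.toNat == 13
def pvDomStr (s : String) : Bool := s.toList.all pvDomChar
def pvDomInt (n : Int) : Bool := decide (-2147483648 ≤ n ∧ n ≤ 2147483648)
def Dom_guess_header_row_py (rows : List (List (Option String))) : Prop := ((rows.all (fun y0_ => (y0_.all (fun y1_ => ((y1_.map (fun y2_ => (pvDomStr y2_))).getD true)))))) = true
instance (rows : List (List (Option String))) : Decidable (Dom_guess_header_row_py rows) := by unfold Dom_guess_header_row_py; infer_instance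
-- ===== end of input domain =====

-- B replaces A's running reset-counter over cells by a staged decomposition: build a
-- boolean validity mask per row, detect a run of three via an any() over window indices,
-- and select the first matching row with next()/findIdx? (alternative, same cost).


-- ===== PORT A =====
-- inner 'for cell in row' loop with the running counter text_run and the early 'return i'
def pvRowLoopA (row : List (Option String)) (run : Nat) : Bool :=
  match row with
  | [] => false
  | c :: rest =>
    match c with
    | some s =>
      if PySem.Chars.strip s.toList ≠ [] then
        if run + 1 ≥ 3 then true else pvRowLoopA rest (run + 1)
      else pvRowLoopA rest 0
    | none => pvRowLoopA rest 0

-- outer 'for i, row in enumerate(rows)' loop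
def pvOuterA (rows : List (List (Option String))) (i : Int) : Int :=
  match rows with
  | [] => -1
  | r :: rest => if pvRowLoopA r 0 then i else pvOuterA rest (i + 1)

def guess_header_row_py (rows : List (List (Option String))) : Int :=
  pvOuterA rows 0

-- ===== PORT B =====
-- isinstance(c, str) and bool(c.strip())
def pvValid (c : Option String) : Bool :=
  match c with
  | some s => PySem.Chars.strip s.toList ≠ []
  | none => false

-- mask[j] and mask[j+1] and mask[j+2]  (j drawn from range(len(mask) - 2), so in bounds)
def pvWin (mask : List Bool) (j : Nat) : Bool :=
  mask.getD j false && mask.getD (j + 1) false && mask.getD (j + 2) false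

-- mask = [...]; any(... for j in range(len(mask) - 2))
def pvHasRun (row : List (Option String)) : Bool :=
  let mask := row.map pvValid
  (List.range (mask.length - 2)).any (pvWin mask)

-- next((i for i, row in enumerate(rows) if _has_run(row)), -1)
def guess_header_row_py_alt (rows : List (List (Option String))) : Int :=
  match rows.findIdx? pvHasRun with
  | some i => (i : Int)
  | none => -1

-- ===== PRECONDITION & SPEC =====
def Spec_guess_header_row_py (rows : List (List (Option String))) (out : Int) : Prop := out = guess_header_row_py_alt rows
instance (rows : List (List (Option String))) (out : Int) : Decidable (Spec_guess_header_row_py rows out) := by unfold Spec_guess_header_row_py; infer_instance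

-- ===== CLAIM (what is proved, stated in full; the proofs are below) =====
def Claim_equal_guess_header_row_py : Prop := ∀ (rows : List (List (Option String))), Dom_guess_header_row_py rows → Spec_guess_header_row_py rows (guess_header_row_py rows)

-- ===== LEMMAS AND PROOFS =====

-- recursive run-of-three detector on the boolean mask, bridging A's counter and B's windows
def pvPref2 : List Bool → Bool
  | a :: b :: _ => a && b
  | _ => false

def pvHas3 : List Bool → Bool
  | [] => false
  | a :: t => (a && pvPref2 t) || pvHas3 t

theorem pvHas3_false (run : Nat) (hrun : run ≤ 2) (l : List Bool) :
    pvHas3 (List.replicate run true ++ false :: l) = pvHas3 l := by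
  interval_cases run <;> cases l <;> simp [pvHas3, pvPref2]

-- A's counter loop equals run detection on the mask, with the current run prepended
theorem pvRowLoopA_eq (row : List (Option String)) :
    ∀ run : Nat, run ≤ 2 →
      pvRowLoopA row run = pvHas3 (List.replicate run true ++ row.map pvValid) := by
  induction row with
  | nil =>
    intro run hrun
    simp only [List.map_nil, List.append_nil, pvRowLoopA]
    interval_cases run <;> simp [pvHas3, pvPref2]
  | cons c rest ih =>
    intro run hrun
    match c with
    | none =>
      simp only [pvRowLoopA, List.map_cons, pvValid]
      rw [ih 0 (by omega), pvHas3_false run hrun]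
      rfl
    | some s =>
      simp only [pvRowLoopA, List.map_cons, pvValid]
      by_cases hs : PySem.Chars.strip s.toList ≠ []
      · rw [if_pos hs, decide_eq_true hs]
        by_cases h3 : run + 1 ≥ 3
        · have h2 : run = 2 := by omega
          subst h2
          simp [pvHas3, pvPref2]
        · rw [if_neg h3, ih (run + 1) (by omega)]
          rw [show List.replicate (run + 1) true ++ rest.map pvValid
              = List.replicate run true ++ true :: rest.map pvValid from by
            rw [List.replicate_succ']; simp]
      · rw [if_neg hs, decide_eq_false hs, ih 0 (by omega), pvHas3_false run hrun]
        rfl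

-- shifting a window index past a cons
theorem pvWin_cons (a : Bool) (t : List Bool) (j : Nat) :
    pvWin (a :: t) (j + 1) = pvWin t j := by
  simp [pvWin]

-- B's indexed window search equals the recursive run detector
theorem pvAny_win_eq (m : List Bool) :
    (List.range (m.length - 2)).any (pvWin m) = pvHas3 m := by
  induction m with
  | nil => simp [pvHas3]
  | cons a t ih =>
    match t, ih with
    | [], _ => simp [pvHas3, pvPref2]
    | [b], _ => simp [pvHas3, pvPref2]
    | b :: c :: t', ih =>
      have hlen : (a :: b :: c :: t').length - 2 = ((b :: c :: t').length - 2) + 1 := by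
        simp
      rw [hlen, List.range_succ_eq_map, List.any_cons, List.any_map]
      have hshift : ((pvWin (a :: b :: c :: t')) ∘ Nat.succ) = pvWin (b :: c :: t') := by
        funext j
        exact pvWin_cons a (b :: c :: t') j
      rw [hshift, ih]
      have h0 : pvWin (a :: b :: c :: t') 0 = (a && pvPref2 (b :: c :: t')) := by
        simp [pvWin, pvPref2, Bool.and_assoc]
      rw [h0]
      rfl

theorem pvHasRun_eq (r : List (Option String)) : pvHasRun r = pvRowLoopA r 0 := by
  rw [pvRowLoopA_eq r 0 (by omega)]
  simp only [List.replicate, List.nil_append, pvHasRun]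
  exact pvAny_win_eq (r.map pvValid)

theorem pvOuter_eq (rows : List (List (Option String))) :
    ∀ i : Int, pvOuterA rows i =
      (match rows.findIdx? pvHasRun with
        | some k => i + (k : Int)
        | none => -1) := by
  induction rows with
  | nil => intro i; rfl
  | cons r rest ih =>
    intro i
    rw [List.findIdx?_cons]
    simp only [pvOuterA, pvHasRun_eq r]
    by_cases hr : pvRowLoopA r 0
    · simp [hr]
    · simp only [hr, Bool.false_eq_true, if_false, ih (i + 1)]
      cases h : rest.findIdx? pvHasRun with
      | none => simp
      | some k =>
        simp only [Option.map_some]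
        push_cast
        ring

-- ===== VERDICT (by name: the statement is the Claim_ definition above) =====
theorem guess_header_row_py_spec : Claim_equal_guess_header_row_py := by
  intro rows _
  unfold Spec_guess_header_row_py guess_header_row_py guess_header_row_py_alt
  rw [pvOuter_eq rows 0]
  cases h : rows.findIdx? pvHasRun <;> simp
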